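-- pv_equiv track=rewrite | github.com/feu-follet/GTFS-pathfinder | recherche.py | levenstein_prefix
-- ===== SOURCE A (Python) =====
-- def levenstein_prefix(s1, s2):
-- 	#returns the minimal levenstein distance between s1 and the prefixes of s2
-- 	table = [[i+j for i in range(1+len(s2))] for j in range(1+len(s1))]
-- 	for i in range(len(s1)):
-- 		for j in range(len(s2)):
-- 			if s1[i].lower()==s2[j].lower():
-- 				table[1+i][1+j] = table[i][j]
-- 			else:
-- 				table[1+i][1+j] = 1+min(table[i][j], table[i+1][j], table[i][j+1])
-- 	return min(table[len(s1)])
-- ===== SOURCE B (Python) =====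
-- def levenstein_prefix(s1, s2):
--     # top-down memoized recursion: d(i, j) = edit distance between s1[:i] and s2[:j]
--     memo = {}
--     def d(i, j):
--         key = (i, j)
--         if key in memo:
--             return memo[key]
--         if i == 0:
--             v = j
--         elif j == 0:
--             v = i
--         elif s1[i - 1].lower() == s2[j - 1].lower():
--             v = d(i - 1, j - 1)
--         else:
--             v = 1 + min(d(i - 1, j - 1), d(i - 1, j), d(i, j - 1))
--         memo[key] = v
--         return v
--     return min(d(len(s1), j) for j in range(len(s2) + 1))
-- ===== Notes on version B (the rewrite author's own statement) =====
-- stated objective: alternative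
-- what changed: A fills the full (len(s1)+1)x(len(s2)+1) table bottom-up with nested index loops and takes min over the last row; B is a top-down memoized recursion d(i,j) on the same recurrence (dict cache, recursive calls only for the subproblems actually needed) with the final min taken over d(len(s1), j).
import Mathlib
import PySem

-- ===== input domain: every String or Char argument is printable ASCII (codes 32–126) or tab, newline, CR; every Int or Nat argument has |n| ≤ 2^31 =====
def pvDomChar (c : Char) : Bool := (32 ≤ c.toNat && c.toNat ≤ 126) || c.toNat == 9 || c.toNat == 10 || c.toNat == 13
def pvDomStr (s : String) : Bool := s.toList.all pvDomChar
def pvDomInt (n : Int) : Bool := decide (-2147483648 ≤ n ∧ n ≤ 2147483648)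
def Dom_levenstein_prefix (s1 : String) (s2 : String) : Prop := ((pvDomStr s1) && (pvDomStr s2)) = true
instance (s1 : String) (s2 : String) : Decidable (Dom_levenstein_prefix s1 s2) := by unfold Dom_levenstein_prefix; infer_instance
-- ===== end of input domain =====

-- B replaces A's bottom-up table fill (nested index loops over a full matrix, then min of the
-- last row) by a top-down memoized recursion d(i,j) with a dict cache; objective: alternative
-- (same value, recursive decomposition instead of iterative table construction).

-- ===== PORT A =====
-- transliteration of Source A: build the full table, fill it cell by cell, take min of the last row
def levenstein_prefix (s1 : String) (s2 : String) : Int :=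
  let c1 := s1.toList
  let c2 := s2.toList
  let table : List (List Int) :=
    (List.range (1 + c1.length)).map (fun j : Nat => (List.range (1 + c2.length)).map (fun i : Nat => (i : Int) + (j : Int)))
  let table := (List.range c1.length).foldl (fun t i =>
    (List.range c2.length).foldl (fun t j =>
      let v :=
        if PySem.Chars.lowerChar (c1.getD i ' ') == PySem.Chars.lowerChar (c2.getD j ' ') then
          (t.getD i []).getD j 0
        else
          1 + min ((t.getD i []).getD j 0) (min ((t.getD (i+1) []).getD j 0) ((t.getD i []).getD (j+1) 0))
      t.set (1+i) ((t.getD (1+i) []).set (1+j) v)) t) table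
  ((PySem.List.min? (table.getD c1.length []) (fun x => x)).getD 0)

-- ===== PORT B =====
-- transliteration of Source B's helper d(i, j): check the memo dict first, otherwise compute v by
-- the recurrence (recursive calls threading the memo in Python's evaluation order), store v
def lpD (c1 c2 : List Char) (i j : Nat) (memo : PySem.Dict (Nat × Nat) Int) :
    Int × PySem.Dict (Nat × Nat) Int :=
  match memo.get? (i, j) with
  | some v => (v, memo)
  | none =>
    let p : Int × PySem.Dict (Nat × Nat) Int :=
      match i, j with
      | 0, j' => ((j' : Int), memo)
      | i'+1, 0 => ((i' : Int) + 1, memo)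
      | i'+1, j'+1 =>
        if PySem.Chars.lowerChar (c1.getD i' ' ') == PySem.Chars.lowerChar (c2.getD j' ' ') then
          lpD c1 c2 i' j' memo
        else
          let q1 := lpD c1 c2 i' j' memo
          let q2 := lpD c1 c2 i' (j'+1) q1.2
          let q3 := lpD c1 c2 (i'+1) j' q2.2
          (1 + min q1.1 (min q2.1 q3.1), q3.2)
    (p.1, p.2.insert (i, j) p.1)
termination_by (i, j)

-- transliteration of Source B's body: min over d(len(s1), j) for j = 0 .. len(s2), memo threaded
def levenstein_prefix_alt (s1 : String) (s2 : String) : Int :=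
  let c1 := s1.toList
  let c2 := s2.toList
  let q0 := lpD c1 c2 c1.length 0 PySem.Dict.empty
  let st := (List.range' 1 c2.length).foldl
    (fun (st : Int × PySem.Dict (Nat × Nat) Int) j =>
      let q := lpD c1 c2 c1.length j st.2
      (min st.1 q.1, q.2)) q0
  st.1

-- ===== PRECONDITION & SPEC =====
def Spec_levenstein_prefix (s1 : String) (s2 : String) (out : Int) : Prop := out = levenstein_prefix_alt s1 s2
instance (s1 : String) (s2 : String) (out : Int) : Decidable (Spec_levenstein_prefix s1 s2 out) := by unfold Spec_levenstein_prefix; infer_instance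

-- ===== CLAIM (what is proved, stated in full; the proofs are below) =====
def Claim_equal_levenstein_prefix : Prop := ∀ (s1 : String) (s2 : String), Dom_levenstein_prefix s1 s2 → Spec_levenstein_prefix s1 s2 (levenstein_prefix s1 s2)

-- ===== LEMMAS AND PROOFS =====

-- the mathematical recurrence both programs compute
def lpDD (a b : List Char) : Nat → Nat → Int
  | 0, j => (j : Int)
  | (i+1), 0 => ((i : Int) + 1)
  | (i+1), (j+1) =>
    if PySem.Chars.lowerChar (a.getD i ' ') == PySem.Chars.lowerChar (b.getD j ' ') then
      lpDD a b i j
    else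
      1 + min (lpDD a b i j) (min (lpDD a b (i+1) j) (lpDD a b i (j+1)))
termination_by i j => (i, j)

-- ---- B side: the memo cache only ever holds correct values ----

def GoodMemo (a b : List Char) (m : PySem.Dict (Nat × Nat) Int) : Prop :=
  ∀ i j v, m.get? (i, j) = some v → v = lpDD a b i j

lemma GoodMemo_insert (a b : List Char) (m : PySem.Dict (Nat × Nat) Int) (i j : Nat) (v : Int)
    (hm : GoodMemo a b m) (hv : v = lpDD a b i j) : GoodMemo a b (m.insert (i, j) v) := by
  intro i' j' w h
  rw [PySem.Dict.get?_insert] at h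
  by_cases hc : (i', j') = ((i, j) : Nat × Nat)
  · obtain ⟨rfl, rfl⟩ := Prod.mk.inj hc
    rw [if_pos rfl] at h
    injection h with h'
    rw [← h']
    exact hv
  · rw [if_neg hc] at h
    exact hm i' j' w h

lemma lpD_correct (a b : List Char) : ∀ (i j : Nat) (m : PySem.Dict (Nat × Nat) Int),
    GoodMemo a b m → (lpD a b i j m).1 = lpDD a b i j ∧ GoodMemo a b (lpD a b i j m).2 := by
  intro i j
  induction i, j using lpDD.induct (a := a) (b := b) with
  | case1 j =>
    intro m hm
    rw [lpD]
    cases hg : m.get? (0, j) with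
    | some v => exact ⟨hm 0 j v hg, hm⟩
    | none =>
      refine ⟨by simp [lpDD], ?_⟩
      exact GoodMemo_insert a b m 0 j _ hm (by simp [lpDD])
  | case2 i =>
    intro m hm
    rw [lpD]
    cases hg : m.get? (i+1, 0) with
    | some v => exact ⟨hm (i+1) 0 v hg, hm⟩
    | none =>
      refine ⟨by simp [lpDD], ?_⟩
      exact GoodMemo_insert a b m (i+1) 0 _ hm (by simp [lpDD])
  | case3 i j heq ih =>
    intro m hm
    rw [lpD]
    cases hg : m.get? (i+1, j+1) with
    | some v => exact ⟨hm (i+1) (j+1) v hg, hm⟩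
    | none =>
      simp only [heq, if_true]
      obtain ⟨h1, h2⟩ := ih m hm
      refine ⟨?_, ?_⟩
      · simp only [h1, lpDD, heq, if_true]
      · exact GoodMemo_insert a b _ (i+1) (j+1) _ h2 (by simp only [h1, lpDD, heq, if_true])
  | case4 i j heq ih1 ih2 ih3 =>
    intro m hm
    rw [lpD]
    cases hg : m.get? (i+1, j+1) with
    | some v => exact ⟨hm (i+1) (j+1) v hg, hm⟩
    | none =>
      simp only [heq, if_false, Bool.false_eq_true]
      obtain ⟨e1, g1⟩ := ih1 m hm
      obtain ⟨e2, g2⟩ := ih3 _ g1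
      obtain ⟨e3, g3⟩ := ih2 _ g2
      have hv : 1 + min (lpD a b i j m).1
          (min (lpD a b i (j+1) (lpD a b i j m).2).1
               (lpD a b (i+1) j (lpD a b i (j+1) (lpD a b i j m).2).2).1)
          = lpDD a b (i+1) (j+1) := by
        rw [e1, e2, e3]
        rw [show lpDD a b (i+1) (j+1)
            = 1 + min (lpDD a b i j) (min (lpDD a b (i+1) j) (lpDD a b i (j+1))) from by
          rw [lpDD, if_neg heq]]
        rw [min_comm (lpDD a b (i+1) j) (lpDD a b i (j+1))]
      exact ⟨hv, GoodMemo_insert a b _ (i+1) (j+1) _ g3 hv⟩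

lemma B_fold (a b : List Char) : ∀ (js : List Nat) (st : Int × PySem.Dict (Nat × Nat) Int),
    GoodMemo a b st.2 →
    (js.foldl (fun st j => (min st.1 (lpD a b a.length j st.2).1, (lpD a b a.length j st.2).2)) st).1
      = (js.map (fun j => lpDD a b a.length j)).foldl min st.1 := by
  intro js
  induction js with
  | nil => intro st _; simp
  | cons j js' ih =>
    intro st hst
    obtain ⟨e, g⟩ := lpD_correct a b a.length j st.2 hst
    rw [List.foldl_cons, List.map_cons, List.foldl_cons,
      ih (min st.1 (lpD a b a.length j st.2).1, (lpD a b a.length j st.2).2) g, e]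

-- ---- A side: characterisation of the filled table ----

def lpRow (a b : List Char) (i : Nat) : List Int :=
  (List.range (1 + b.length)).map (fun j => lpDD a b i j)

def lpMix (a b : List Char) (i k : Nat) : List Int :=
  (List.range (1 + b.length)).map (fun c => if c ≤ k then lpDD a b (1+i) c else (c : Int) + ((i : Int) + 1))

lemma set_getD_self (t : List (List Int)) (i : Nat) (h : i < t.length) : t.set i (t.getD i []) = t := by
  rw [List.getD_eq_getElem?_getD, List.getElem?_eq_getElem h]
  simp

lemma getD_set_self' (t : List (List Int)) (i : Nat) (x : List Int) (h : i < t.length) :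
    (t.set i x).getD i [] = x := by
  simp [List.getD_eq_getElem?_getD, h]

lemma getD_set_ne' (t : List (List Int)) (i k : Nat) (x : List Int) (h : i ≠ k) :
    (t.set i x).getD k [] = t.getD k [] := by
  simp [List.getD_eq_getElem?_getD, List.getElem?_set_ne h]

lemma lpMix_set (a b : List Char) (i k : Nat) (_hk : k < b.length) :
    (lpMix a b i k).set (k+1) (lpDD a b (i+1) (k+1)) = lpMix a b i (k+1) := by
  apply List.ext_getElem
  · simp [lpMix]
  · intro c h1 h2
    simp only [lpMix, List.length_map, List.length_range] at h1 h2
    simp only [lpMix, List.getElem_set, List.getElem_map, List.getElem_range]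
    by_cases hc : k + 1 = c
    · rw [if_pos hc, if_pos (by omega), ← hc, show k + 1 = 1 + k by ring,
        show (1:Nat) + i = i + 1 by ring]
    · rw [if_neg hc]
      by_cases hck : c ≤ k
      · rw [if_pos hck, if_pos (by omega)]
      · rw [if_neg hck, if_neg (by omega)]

lemma A_inner (a b : List Char) (i : Nat) :
    ∀ (k : Nat), k ≤ b.length → ∀ (t : List (List Int)),
      t.getD i [] = lpRow a b i → 1 + i < t.length → t.getD (1+i) [] = lpMix a b i 0 →
      (List.range k).foldl (fun t j =>
        let v :=
          if PySem.Chars.lowerChar (a.getD i ' ') == PySem.Chars.lowerChar (b.getD j ' ') then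
            (t.getD i []).getD j 0
          else
            1 + min ((t.getD i []).getD j 0) (min ((t.getD (i+1) []).getD j 0) ((t.getD i []).getD (j+1) 0))
        t.set (1+i) ((t.getD (1+i) []).set (1+j) v)) t = t.set (1+i) (lpMix a b i k) := by
  intro k
  induction k with
  | zero =>
    intro _ t h1 h2 h3
    rw [List.range_zero, List.foldl_nil, ← h3, set_getD_self t (1+i) h2]
  | succ k ih =>
    intro _hk t h1 h2 h3
    rw [List.range_succ, List.foldl_append, List.foldl_cons, List.foldl_nil,
      ih (by omega) t h1 h2 h3]
    dsimp only
    simp only [show (1:Nat) + i = i + 1 from by ring, show (1:Nat) + k = k + 1 from by ring]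
    have h2' : i + 1 < t.length := by omega
    have e1 : ((t.set (i+1) (lpMix a b i k)).getD i []) = lpRow a b i := by
      rw [getD_set_ne' _ _ _ _ (by omega), h1]
    have e2 : ((t.set (i+1) (lpMix a b i k)).getD (i+1) []) = lpMix a b i k := by
      rw [getD_set_self' _ _ _ h2']
    have r1 : (lpRow a b i).getD k 0 = lpDD a b i k := by
      rw [lpRow, PySem.List.getD_map_range _ _ _ _ (by omega)]
    have r2 : (lpRow a b i).getD (k+1) 0 = lpDD a b i (k+1) := by
      rw [lpRow, PySem.List.getD_map_range _ _ _ _ (by omega)]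
    have r3 : (lpMix a b i k).getD k 0 = lpDD a b (i+1) k := by
      rw [lpMix, PySem.List.getD_map_range _ _ _ _ (by omega), if_pos le_rfl,
        show (1:Nat) + i = i + 1 by ring]
    rw [e1, e2, r1, r2, r3, List.set_set]
    have hv : (if PySem.Chars.lowerChar (a.getD i ' ') == PySem.Chars.lowerChar (b.getD k ' ')
        then lpDD a b i k
        else 1 + min (lpDD a b i k) (min (lpDD a b (i+1) k) (lpDD a b i (k+1))))
        = lpDD a b (i+1) (k+1) := by
      rw [lpDD]
    rw [hv, lpMix_set a b i k (by omega)]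

def lpInner (a b : List Char) (i : Nat) (t : List (List Int)) : List (List Int) :=
  (List.range b.length).foldl (fun t j =>
      let v :=
        if PySem.Chars.lowerChar (a.getD i ' ') == PySem.Chars.lowerChar (b.getD j ' ') then
          (t.getD i []).getD j 0
        else
          1 + min ((t.getD i []).getD j 0) (min ((t.getD (i+1) []).getD j 0) ((t.getD i []).getD (j+1) 0))
      t.set (1+i) ((t.getD (1+i) []).set (1+j) v)) t

def lpTable0 (a b : List Char) : List (List Int) :=
  (List.range (1 + a.length)).map (fun j : Nat => (List.range (1 + b.length)).map (fun i : Nat => (i : Int) + (j : Int)))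

lemma lpMix_full (a b : List Char) (i : Nat) : lpMix a b i b.length = lpRow a b (1+i) := by
  unfold lpMix lpRow
  refine List.map_congr_left (fun c hc => ?_)
  simp only [List.mem_range] at hc
  rw [if_pos (by omega)]

lemma lpDD_zero_left (a b : List Char) (j : Nat) : lpDD a b 0 j = (j : Int) := by
  simp [lpDD]

lemma lpDD_succ_right (a b : List Char) (i : Nat) : lpDD a b (i+1) 0 = (i : Int) + 1 := by
  simp [lpDD]

lemma lpInit_eq_mix (a b : List Char) (m : Nat) :
    (List.range (1 + b.length)).map (fun c : Nat => (c : Int) + ((1 + m : Nat) : Int)) = lpMix a b m 0 := by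
  unfold lpMix
  refine List.map_congr_left (fun c hc => ?_)
  by_cases h : c ≤ 0
  · rw [if_pos h, show c = 0 by omega, show 1 + m = m + 1 by ring, lpDD_succ_right]
    push_cast; ring
  · rw [if_neg h]
    push_cast; ring

lemma A_outer (a b : List Char) :
    ∀ (m : Nat), m ≤ a.length →
      (List.range m).foldl (fun t i => lpInner a b i t) (lpTable0 a b) =
        (List.range (1 + a.length)).map
          (fun r => if r ≤ m then lpRow a b r
                    else (List.range (1 + b.length)).map (fun c : Nat => (c : Int) + (r : Int))) := by
  intro m
  induction m with
  | zero =>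
    intro _
    rw [List.range_zero, List.foldl_nil]
    unfold lpTable0
    refine List.map_congr_left (fun r hr => ?_)
    by_cases h : r ≤ 0
    · rw [if_pos h, show r = 0 by omega]
      unfold lpRow
      refine List.map_congr_left (fun c hc => ?_)
      rw [lpDD_zero_left]
      push_cast; ring
    · rw [if_neg h]
  | succ m ih =>
    intro hm
    rw [List.range_succ, List.foldl_append, List.foldl_cons, List.foldl_nil, ih (by omega)]
    have h1 : ((List.range (1 + a.length)).map
        (fun r => if r ≤ m then lpRow a b r
                  else (List.range (1 + b.length)).map (fun c : Nat => (c : Int) + (r : Int)))).getD m []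
        = lpRow a b m := by
      rw [PySem.List.getD_map_range _ _ _ _ (by omega), if_pos le_rfl]
    have h3 : ((List.range (1 + a.length)).map
        (fun r => if r ≤ m then lpRow a b r
                  else (List.range (1 + b.length)).map (fun c : Nat => (c : Int) + (r : Int)))).getD (1+m) []
        = lpMix a b m 0 := by
      rw [PySem.List.getD_map_range _ _ _ _ (by omega), if_neg (by omega), lpInit_eq_mix]
    have := A_inner a b m b.length le_rfl _ h1 (by simp; omega) h3
    unfold lpInner
    rw [this, lpMix_full]
    apply List.ext_getElem
    · simp
    · intro r hr1 hr2
      simp only [List.length_set, List.length_map, List.length_range] at hr1 hr2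
      simp only [List.getElem_set, List.getElem_map, List.getElem_range]
      by_cases hc : 1 + m = r
      · rw [if_pos hc, if_pos (by omega), ← hc]
      · rw [if_neg hc]
        by_cases hrm : r ≤ m
        · rw [if_pos hrm, if_pos (by omega)]
        · rw [if_neg hrm, if_neg (by omega)]

lemma A_eq (s1 s2 : String) :
    levenstein_prefix s1 s2 =
      ((PySem.List.min? (((List.range s1.toList.length).foldl
        (fun t i => lpInner s1.toList s2.toList i t) (lpTable0 s1.toList s2.toList)).getD s1.toList.length [])
        (fun x => x)).getD 0) := rfl

lemma lpDD_zero_right (a b : List Char) (i : Nat) : lpDD a b i 0 = (i : Int) := by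
  cases i with
  | zero => simp [lpDD]
  | succ n => rw [lpDD_succ_right]; push_cast; ring

lemma A_val (s1 s2 : String) :
    levenstein_prefix s1 s2 =
      ((List.range s2.toList.length).map
        (fun j => lpDD s1.toList s2.toList s1.toList.length (j+1))).foldl
        min (lpDD s1.toList s2.toList s1.toList.length 0) := by
  rw [A_eq, A_outer s1.toList s2.toList s1.toList.length le_rfl,
    PySem.List.getD_map_range _ _ _ _ (by omega), if_pos le_rfl]
  rw [lpRow, show 1 + s2.toList.length = s2.toList.length + 1 by ring,
    List.range_succ_eq_map, List.map_cons, List.map_map, PySem.List.min?_id_cons]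
  simp only [lpDD_zero_right, Option.getD_some]
  rfl

lemma B_val (s1 s2 : String) :
    levenstein_prefix_alt s1 s2 =
      ((List.range' 1 s2.toList.length).map
        (fun k => lpDD s1.toList s2.toList s1.toList.length k)).foldl
        min (lpDD s1.toList s2.toList s1.toList.length 0) := by
  have hempty : GoodMemo s1.toList s2.toList PySem.Dict.empty := by
    intro i j v h
    rw [PySem.Dict.get?_empty] at h
    exact absurd h (Option.some_ne_none v).symm
  obtain ⟨e0, g0⟩ := lpD_correct s1.toList s2.toList s1.toList.length 0 PySem.Dict.empty hempty
  have h := B_fold s1.toList s2.toList (List.range' 1 s2.toList.length)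
    (lpD s1.toList s2.toList s1.toList.length 0 PySem.Dict.empty) g0
  rw [e0] at h
  exact h

-- ===== VERDICT (by name: the statement is the Claim_ definition above) =====
theorem levenstein_prefix_spec : Claim_equal_levenstein_prefix := by
  unfold Claim_equal_levenstein_prefix
  intro s1 s2 _
  unfold Spec_levenstein_prefix
  rw [A_val, B_val, List.range'_eq_map_range, List.map_map]
  congr 1
  refine List.map_congr_left (fun j hj => ?_)
  simp only [Function.comp]
  congr 1
  omega
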